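-- pv_equiv track=rewrite | github.com/MEDUZZZZZZZ/Python | lesson_5/task_5_3_1.py | storing_gen
-- ===== SOURCE A (Python) =====
-- def storing_gen(list1,list2):
--     """ Возвращает генератор пар ученик группа """
--     counter = 0
--     for tutor in list1:
--         if counter <= len(list2) - 1:
--             yield tutor, list2[counter]
--             counter += 1
--         else:
--             yield tutor, None
-- ===== SOURCE B (Python) =====
-- def storing_gen(list1, list2):
--     """ Возвращает генератор пар ученик группа """
--     k = min(len(list1), len(list2))
--     for tutor, group in zip(list1[:k], list2[:k]):
--         yield tutor, group
--     for tutor in list1[k:]: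
--         yield tutor, None
-- ===== Notes on version B (the rewrite author's own statement) =====
-- stated objective: simpler
-- what changed: Replaces the counter-with-bounds-check single loop by a two-stage structure: compute the split point k = min(len(list1), len(list2)), emit the zipped paired prefix, then emit the None-padded remainder of list1 -- no index variable and no per-element branch.
import Mathlib
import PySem

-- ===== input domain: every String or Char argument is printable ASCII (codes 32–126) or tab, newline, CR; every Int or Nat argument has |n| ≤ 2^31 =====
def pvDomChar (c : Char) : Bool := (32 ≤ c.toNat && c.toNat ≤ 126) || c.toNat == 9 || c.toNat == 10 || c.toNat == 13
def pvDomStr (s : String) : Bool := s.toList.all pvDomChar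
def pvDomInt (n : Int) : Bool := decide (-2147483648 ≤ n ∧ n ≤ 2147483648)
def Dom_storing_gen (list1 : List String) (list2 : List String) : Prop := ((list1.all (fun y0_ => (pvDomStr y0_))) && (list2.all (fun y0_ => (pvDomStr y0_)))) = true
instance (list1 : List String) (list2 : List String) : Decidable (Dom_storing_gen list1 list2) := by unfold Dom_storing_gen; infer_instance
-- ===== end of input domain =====

-- B replaces A's counter-and-branch loop with a two-stage decomposition (zip the paired prefix, then pad the rest); objective: simpler.


-- ===== PORT A =====
-- A's loop: counter state, each yield becomes a cons
def storingGoA (list1 : List String) (list2 : List String) (counter : Int) : List (String × Option String) :=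
  match list1 with
  | [] => []
  | tutor :: rest =>
    if counter ≤ (list2.length : Int) - 1 then
      (tutor, PySem.List.pyGet? list2 counter) :: storingGoA rest list2 (counter + 1)
    else
      (tutor, none) :: storingGoA rest list2 counter

def storing_gen (list1 : List String) (list2 : List String) : List (String × Option String) :=
  storingGoA list1 list2 0

-- ===== PORT B =====
-- B: k = min of the lengths; first stage zips the two k-prefixes (Python slices [:k] with
-- 0 ≤ k ≤ length are exactly List.take k), second stage maps the remainder list1[k:] to (·, none).
def storing_gen_alt (list1 : List String) (list2 : List String) : List (String × Option String) :=
  let k := min list1.length list2.length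
  ((list1.take k).zip (list2.take k)).map (fun p => (p.1, some p.2))
    ++ (list1.drop k).map (fun t => (t, none))

-- ===== PRECONDITION & SPEC =====
def Spec_storing_gen (list1 : List String) (list2 : List String) (out : List (String × Option String)) : Prop := out = storing_gen_alt list1 list2
instance (list1 : List String) (list2 : List String) (out : List (String × Option String)) : Decidable (Spec_storing_gen list1 list2 out) := by unfold Spec_storing_gen; infer_instance

-- ===== CLAIM (what is proved, stated in full; the proofs are below) =====
def Claim_equal_storing_gen : Prop := ∀ (list1 : List String) (list2 : List String), Dom_storing_gen list1 list2 → Spec_storing_gen list1 list2 (storing_gen list1 list2)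

-- ===== LEMMAS AND PROOFS =====
-- proof-side intermediate form: structural co-recursion on the pair of lists
def storingPad (list1 : List String) (list2 : List String) : List (String × Option String) :=
  match list1, list2 with
  | [], _ => []
  | t :: ts, [] => (t, none) :: storingPad ts []
  | t :: ts, g :: gs => (t, some g) :: storingPad ts gs

lemma storingGoA_eq_pad (list1 : List String) (list2 : List String) (c : Int)
    (hc : 0 ≤ c) : storingGoA list1 list2 c = storingPad list1 (list2.drop c.toNat) := by
  induction list1 generalizing c with
  | nil => simp [storingGoA, storingPad]
  | cons t ts ih =>
    by_cases h : c ≤ (list2.length : Int) - 1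
    · have hlt : c.toNat < list2.length := by omega
      have hdrop : list2.drop c.toNat = list2[c.toNat] :: list2.drop (c.toNat + 1) :=
        List.drop_eq_getElem_cons hlt
      have hget : PySem.List.pyGet? list2 c = some list2[c.toNat] := by
        have hcc : c = ((c.toNat : Nat) : Int) := by omega
        conv_lhs => rw [hcc]
        rw [PySem.List.pyGet?_natCast]
        exact List.getElem?_eq_getElem hlt
      have h1 : (c + 1).toNat = c.toNat + 1 := by omega
      rw [hdrop]
      simp only [storingGoA, storingPad, if_pos h]
      rw [hget, ih (c + 1) (by omega), h1]
    · have hdrop : list2.drop c.toNat = [] := by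
        apply List.drop_eq_nil_of_le; omega
      rw [hdrop]
      simp only [storingGoA, storingPad, if_neg h]
      rw [ih c hc, hdrop]

lemma storingPad_eq_alt (list1 : List String) (list2 : List String) :
    storingPad list1 list2 = storing_gen_alt list1 list2 := by
  induction list1 generalizing list2 with
  | nil => simp [storingPad, storing_gen_alt]
  | cons t ts ih =>
    cases list2 with
    | nil => simp [storingPad, storing_gen_alt, ih []]
    | cons g gs =>
      simp [storingPad, storing_gen_alt, ih gs, Nat.succ_min_succ]

-- ===== VERDICT (by name: the statement is the Claim_ definition above) =====
theorem storing_gen_spec : Claim_equal_storing_gen := by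
  intro list1 list2 _
  unfold Spec_storing_gen storing_gen
  rw [← storingPad_eq_alt]
  simpa using storingGoA_eq_pad list1 list2 0 le_rfl
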